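-- pv_equiv track=rewrite | github.com/ogawa-tomo/atcoder_daily_training | medium/20251106_1830/g/main.py | f
-- ===== SOURCE A (Python) =====
-- def f(k):
--     if k == 0:
--         return 1
--     if k == 1:
--         return 2
--     if k == 2:
--         return 3
--     # if k >= 3:
--     return f((k // 2) // 2) + 2 * f((k // 2) // 3) + f((k // 3) // 3)
-- ===== SOURCE B (Python) =====
-- def f(k):
--     memo = {}
--
--     def go(n):
--         v = memo.get(n)
--         if v is not None:
--             return v
--         if n == 0:
--             r = 1
--         elif n == 1:
--             r = 2
--         elif n == 2:
--             r = 3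
--         else:
--             r = go(n // 4) + 2 * go(n // 6) + go(n // 9)
--         memo[n] = r
--         return r
--
--     return go(k)
-- ===== Notes on version B (the rewrite author's own statement) =====
-- stated objective: faster
-- what changed: B memoizes the recursion on k in a dict (and collapses the double floor-divisions k//2//2, k//2//3, k//3//3 into k//4, k//6, k//9), so each of the O(polylog k) distinct arguments is computed once instead of exponentially re-expanding the call tree.
import Mathlib
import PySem

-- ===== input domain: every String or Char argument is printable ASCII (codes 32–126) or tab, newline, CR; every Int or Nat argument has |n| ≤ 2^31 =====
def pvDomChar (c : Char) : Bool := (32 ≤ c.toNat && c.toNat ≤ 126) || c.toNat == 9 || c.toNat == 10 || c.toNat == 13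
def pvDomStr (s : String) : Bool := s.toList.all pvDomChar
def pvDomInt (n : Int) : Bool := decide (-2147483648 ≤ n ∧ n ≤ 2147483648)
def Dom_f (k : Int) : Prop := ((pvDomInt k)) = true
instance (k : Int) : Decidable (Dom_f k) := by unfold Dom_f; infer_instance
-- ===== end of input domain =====

-- B memoizes the recursion in a dict, computing each distinct argument once; this file proves A = B on all k ≥ 0.

-- ===== PORT A =====
-- The 'k < 0' branch only makes the Lean definition total: Python A never returns
-- there (infinite recursion, excluded by Pre_f).
def f (k : Int) : Int :=
  if k < 0 then 0
  else if k = 0 then 1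
  else if k = 1 then 2
  else if k = 2 then 3
  else
    f (PySem.Int.floordiv (PySem.Int.floordiv k 2) 2)
      + 2 * f (PySem.Int.floordiv (PySem.Int.floordiv k 2) 3)
      + f (PySem.Int.floordiv (PySem.Int.floordiv k 3) 3)
termination_by k.toNat
decreasing_by
  all_goals
    simp only [PySem.Int.floordiv_eq_ediv_of_pos (by omega : (0:Int) < 2),
      PySem.Int.floordiv_eq_ediv_of_pos (by omega : (0:Int) < 3)]
    omega

-- ===== PORT B =====
-- go memo n = (value of f at n, updated memo); the 'n < 0' branch only makes it total.
def fGo (memo : PySem.Dict Int Int) (n : Int) : Int × PySem.Dict Int Int :=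
  match memo.get? n with
  | some v => (v, memo)
  | none =>
    if n < 0 then (0, memo)
    else
      let p : Int × PySem.Dict Int Int :=
        if n = 0 then (1, memo)
        else if n = 1 then (2, memo)
        else if n = 2 then (3, memo)
        else
          let a := fGo memo (PySem.Int.floordiv n 4)
          let b := fGo a.2 (PySem.Int.floordiv n 6)
          let c := fGo b.2 (PySem.Int.floordiv n 9)
          (a.1 + 2 * b.1 + c.1, c.2)
      (p.1, p.2.insert n p.1)
termination_by n.toNat
decreasing_by
  all_goals
    simp only [PySem.Int.floordiv_eq_ediv_of_pos (by omega : (0:Int) < 4),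
      PySem.Int.floordiv_eq_ediv_of_pos (by omega : (0:Int) < 6),
      PySem.Int.floordiv_eq_ediv_of_pos (by omega : (0:Int) < 9)]
    omega

def f_alt (k : Int) : Int := (fGo PySem.Dict.empty k).1

-- ===== PRECONDITION & SPEC =====
-- Pre_f excludes exactly the negative k, on which Python A (and B) recurses forever
-- (RecursionError): f(k) for k < 0 reduces to itself.
def Pre_f (k : Int) : Prop := 0 ≤ k
instance (k : Int) : Decidable (Pre_f k) := by unfold Pre_f; infer_instance

def pvWitness_f : Int := (5)

def Spec_f (k : Int) (out : Int) : Prop := out = f_alt k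
instance (k : Int) (out : Int) : Decidable (Spec_f k out) := by unfold Spec_f; infer_instance

-- ===== CLAIM (what is proved, stated in full; the proofs are below) =====
def Claim_equal_f : Prop := ∀ (k : Int), Dom_f k → Pre_f k → Spec_f k (f k)

-- ===== LEMMAS AND PROOFS =====

-- memo invariant: every stored value is the corresponding value of f
def GoodMemo (memo : PySem.Dict Int Int) : Prop :=
  ∀ (n v : Int), memo.get? n = some v → v = f n

theorem goodMemo_empty : GoodMemo PySem.Dict.empty := by
  intro n v h
  simp [PySem.Dict.get?_empty] at h

-- the recursion of A, re-expressed with the collapsed divisors B uses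
theorem f_unfold_collapsed (k : Int) (h : 3 ≤ k) :
    f k = f (PySem.Int.floordiv k 4) + 2 * f (PySem.Int.floordiv k 6)
      + f (PySem.Int.floordiv k 9) := by
  rw [f]
  have h2 : PySem.Int.floordiv (PySem.Int.floordiv k 2) 2 = PySem.Int.floordiv k 4 := by
    simp only [PySem.Int.floordiv_eq_ediv_of_pos (by omega : (0:Int) < 2),
      PySem.Int.floordiv_eq_ediv_of_pos (by omega : (0:Int) < 4)]
    omega
  have h6 : PySem.Int.floordiv (PySem.Int.floordiv k 2) 3 = PySem.Int.floordiv k 6 := by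
    simp only [PySem.Int.floordiv_eq_ediv_of_pos (by omega : (0:Int) < 2),
      PySem.Int.floordiv_eq_ediv_of_pos (by omega : (0:Int) < 3),
      PySem.Int.floordiv_eq_ediv_of_pos (by omega : (0:Int) < 6)]
    omega
  have h9 : PySem.Int.floordiv (PySem.Int.floordiv k 3) 3 = PySem.Int.floordiv k 9 := by
    simp only [PySem.Int.floordiv_eq_ediv_of_pos (by omega : (0:Int) < 3),
      PySem.Int.floordiv_eq_ediv_of_pos (by omega : (0:Int) < 9)]
    omega
  rw [h2, h6, h9]
  rw [if_neg (by omega : ¬ k < 0), if_neg (by omega : ¬ k = 0),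
    if_neg (by omega : ¬ k = 1), if_neg (by omega : ¬ k = 2)]

theorem goodMemo_insert (memo : PySem.Dict Int Int) (n : Int)
    (hm : GoodMemo memo) : GoodMemo (memo.insert n (f n)) := by
  intro m v h
  rw [PySem.Dict.get?_insert] at h
  by_cases hc : m = n
  · subst hc; simp at h; exact h.symm
  · simp [hc] at h; exact hm m v h

theorem fGo_correct (n : Int) (memo : PySem.Dict Int Int)
    (hn : 0 ≤ n) (hm : GoodMemo memo) :
    (fGo memo n).1 = f n ∧ GoodMemo (fGo memo n).2 := by
  rw [fGo]
  cases hget : memo.get? n with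
  | some v => exact ⟨hm n v hget, by simpa [hget] using hm⟩
  | none =>
    have hneg : ¬ n < 0 := by omega
    simp only [hneg, if_false]
    by_cases h0 : n = 0
    · subst h0
      refine ⟨by rw [f]; rfl, ?_⟩
      have : f 0 = 1 := by rw [f]; rfl
      simpa using this ▸ goodMemo_insert memo 0 hm
    by_cases h1 : n = 1
    · subst h1
      refine ⟨by rw [f]; rfl, ?_⟩
      have : f 1 = 2 := by rw [f]; rfl
      simpa [h0] using this ▸ goodMemo_insert memo 1 hm
    by_cases h2 : n = 2
    · subst h2
      refine ⟨by rw [f]; rfl, ?_⟩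
      have : f 2 = 3 := by rw [f]; rfl
      simpa using this ▸ goodMemo_insert memo 2 hm
    · have h3 : 3 ≤ n := by omega
      simp only [h0, h1, h2, if_false]
      have hd4 : (0:Int) ≤ PySem.Int.floordiv n 4 := by
        rw [PySem.Int.floordiv_eq_ediv_of_pos (by omega)]; omega
      have hd6 : (0:Int) ≤ PySem.Int.floordiv n 6 := by
        rw [PySem.Int.floordiv_eq_ediv_of_pos (by omega)]; omega
      have hd9 : (0:Int) ≤ PySem.Int.floordiv n 9 := by
        rw [PySem.Int.floordiv_eq_ediv_of_pos (by omega)]; omega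
      have ha := fGo_correct (PySem.Int.floordiv n 4) memo hd4 hm
      have hb := fGo_correct (PySem.Int.floordiv n 6) (fGo memo (PySem.Int.floordiv n 4)).2 hd6 ha.2
      have hc := fGo_correct (PySem.Int.floordiv n 9)
        (fGo (fGo memo (PySem.Int.floordiv n 4)).2 (PySem.Int.floordiv n 6)).2 hd9 hb.2
      constructor
      · simp only [ha.1, hb.1, hc.1]
        exact (f_unfold_collapsed n h3).symm
      · have := goodMemo_insert _ n hc.2
        rw [ha.1, hb.1, hc.1, ← f_unfold_collapsed n h3] at *
        simpa using this
termination_by n.toNat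
decreasing_by
  all_goals
    simp only [PySem.Int.floordiv_eq_ediv_of_pos (by omega : (0:Int) < 4),
      PySem.Int.floordiv_eq_ediv_of_pos (by omega : (0:Int) < 6),
      PySem.Int.floordiv_eq_ediv_of_pos (by omega : (0:Int) < 9)]
    omega

-- ===== VERDICT (by name: the statement is the Claim_ definition above) =====
theorem f_spec : Claim_equal_f := by
  intro k _ hk
  unfold Spec_f f_alt
  exact ((fGo_correct k PySem.Dict.empty hk goodMemo_empty).1).symm
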